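-- pv_equiv track=rewrite | github.com/Hawkins30/log_analysis_api | analyser.py | analyse_log_lines
-- ===== SOURCE A (Python) =====
-- def analyse_log_lines(lines):
--     valid_levels = ["ERROR", "WARNING", "INFO"]
--     counts = {"ERROR": 0, "WARNING": 0, "INFO": 0}
--     malformed_lines = 0
--
--     for line in lines:
--         parts = line.split(" ")
--
--         if len(parts) < 4:
--             malformed_lines += 1
--             continue
--
--         level = parts[2]
--
--         if level not in valid_levels:
--             malformed_lines += 1
--             continue
--
--         counts[level] += 1
--
--     return counts, malformed_lines
-- ===== SOURCE B (Python) =====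
-- def analyse_log_lines(lines):
--     def level_of(line):
--         parts = line.split(" ")
--         if len(parts) >= 4 and parts[2] in ("ERROR", "WARNING", "INFO"):
--             return parts[2]
--         return None
--     labels = [level_of(line) for line in lines]
--     counts = {lvl: labels.count(lvl) for lvl in ("ERROR", "WARNING", "INFO")}
--     return counts, labels.count(None)
-- ===== Notes on version B (the rewrite author's own statement) =====
-- stated objective: alternative
-- what changed: B is staged: a first map pass classifies each line into its level or None, then the result dict and malformed count are produced by separate .count passes over that label list, instead of A's single fold mutating a dict and a malformed counter.
import Mathlib
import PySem

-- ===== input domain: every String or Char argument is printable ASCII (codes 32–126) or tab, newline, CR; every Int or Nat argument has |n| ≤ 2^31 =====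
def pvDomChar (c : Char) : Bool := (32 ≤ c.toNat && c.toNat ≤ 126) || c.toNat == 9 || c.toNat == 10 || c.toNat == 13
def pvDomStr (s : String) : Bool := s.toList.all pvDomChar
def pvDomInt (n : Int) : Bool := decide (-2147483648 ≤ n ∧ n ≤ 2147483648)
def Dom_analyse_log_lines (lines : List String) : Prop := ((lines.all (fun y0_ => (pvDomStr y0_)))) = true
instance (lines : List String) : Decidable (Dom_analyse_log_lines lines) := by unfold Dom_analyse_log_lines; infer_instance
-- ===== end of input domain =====

-- B is staged: classify every line into its level (or None) in one map pass, then derive each count by separate .count passes (alternative decomposition, same cost).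

-- ===== PORT A =====
-- loop body of A: split, early malformed checks, then counts[level] += 1
def pvStepA (st : PySem.Dict String Int × Int) (line : String) : PySem.Dict String Int × Int :=
  let parts := (PySem.Str.split? line " ").getD []
  if parts.length < 4 then (st.1, st.2 + 1)
  else
    let level := PySem.List.pyGetD parts 2 ""
    if level ∉ (["ERROR", "WARNING", "INFO"] : List String) then (st.1, st.2 + 1)
    else (st.1.modify level 0 (· + 1), st.2)

def analyse_log_lines (lines : List String) : (List (String × Int)) × Int :=
  let counts : PySem.Dict String Int := PySem.Dict.ofList [("ERROR", 0), ("WARNING", 0), ("INFO", 0)]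
  let r := lines.foldl pvStepA (counts, 0)
  (r.1.items, r.2)

-- ===== PORT B =====
-- level_of: the level of a well-formed line, none for a malformed one
def pvLevelOf (line : String) : Option String :=
  let parts := (PySem.Str.split? line " ").getD []
  if 4 ≤ parts.length ∧ PySem.List.pyGetD parts 2 "" ∈ (["ERROR", "WARNING", "INFO"] : List String)
  then some (PySem.List.pyGetD parts 2 "")
  else none

def analyse_log_lines_alt (lines : List String) : (List (String × Int)) × Int :=
  let labels := lines.map pvLevelOf
  let counts := (["ERROR", "WARNING", "INFO"] : List String).map
    (fun lvl => (lvl, (PySem.List.count labels (some lvl) : Int)))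
  (counts, (PySem.List.count labels none : Int))

-- ===== PRECONDITION & SPEC =====
def Spec_analyse_log_lines (lines : List String) (out : (List (String × Int)) × Int) : Prop := out = analyse_log_lines_alt lines
instance (lines : List String) (out : (List (String × Int)) × Int) : Decidable (Spec_analyse_log_lines lines out) := by unfold Spec_analyse_log_lines; infer_instance

-- ===== CLAIM =====
def Claim_equal_analyse_log_lines : Prop := ∀ (lines : List String), Dom_analyse_log_lines lines → Spec_analyse_log_lines lines (analyse_log_lines lines)

-- ===== LEMMAS AND PROOFS =====

-- the three-key dict A's loop state always has
def pvD (e w i : Int) : PySem.Dict String Int := PySem.Dict.mk [("ERROR", e), ("WARNING", w), ("INFO", i)]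

lemma pvD_modify_E (e w i : Int) : (pvD e w i).modify "ERROR" 0 (· + 1) = pvD (e + 1) w i := rfl
lemma pvD_modify_W (e w i : Int) : (pvD e w i).modify "WARNING" 0 (· + 1) = pvD e (w + 1) i := rfl
lemma pvD_modify_I (e w i : Int) : (pvD e w i).modify "INFO" 0 (· + 1) = pvD e w (i + 1) := rfl

-- A's fold, started from (pvD e w i, m), ends at the pvLevelOf-label counts added on
lemma pv_loopA (lines : List String) : ∀ (e w i m : Int),
    lines.foldl pvStepA (pvD e w i, m)
      = (pvD (e + ((lines.map pvLevelOf).count (some "ERROR") : Int))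
             (w + ((lines.map pvLevelOf).count (some "WARNING") : Int))
             (i + ((lines.map pvLevelOf).count (some "INFO") : Int)),
         m + ((lines.map pvLevelOf).count none : Int)) := by
  induction lines with
  | nil => intro e w i m; simp
  | cons line rest ih =>
    intro e w i m
    simp only [List.foldl_cons, List.map_cons, List.count_cons]
    by_cases h4 : ((PySem.Str.split? line " ").getD []).length < 4
    · have hl : pvLevelOf line = none := by simp [pvLevelOf]; omega
      have hA : pvStepA (pvD e w i, m) line = (pvD e w i, m + 1) := by simp [pvStepA, h4]
      rw [hA, ih, hl]
      simp [pvD, Prod.ext_iff]; omega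
    · set lv := PySem.List.pyGetD ((PySem.Str.split? line " ").getD []) 2 "" with hlv
      by_cases hm : lv ∈ (["ERROR", "WARNING", "INFO"] : List String)
      · have hl : pvLevelOf line = some lv := by simp [pvLevelOf, ← hlv, hm]; omega
        have hA : pvStepA (pvD e w i, m) line = ((pvD e w i).modify lv 0 (· + 1), m) := by
          simp [pvStepA, h4, ← hlv, hm]
        rw [hA, hl]
        simp only [List.mem_cons, List.not_mem_nil, or_false] at hm
        rcases hm with h1 | h1 | h1 <;> rw [h1] at hA ⊢ <;>
          [rw [pvD_modify_E]; rw [pvD_modify_W]; rw [pvD_modify_I]] <;>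
          rw [ih] <;> simp [pvD, Prod.ext_iff] <;> omega
      · have hm' : ¬ lv = "ERROR" ∧ ¬ lv = "WARNING" ∧ ¬ lv = "INFO" := by
          simpa [not_or] using hm
        have hl : pvLevelOf line = none := by
          simp [pvLevelOf, ← hlv]; intro _; exact hm'
        have hA : pvStepA (pvD e w i, m) line = (pvD e w i, m + 1) := by
          simp [pvStepA, h4, ← hlv, hm]
        rw [hA, ih, hl]
        simp [pvD, Prod.ext_iff]; omega

-- ===== VERDICT =====
theorem analyse_log_lines_spec : Claim_equal_analyse_log_lines := by
  intro lines _
  unfold Spec_analyse_log_lines analyse_log_lines analyse_log_lines_alt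
  have h0 : PySem.Dict.ofList [("ERROR", (0:Int)), ("WARNING", 0), ("INFO", 0)] = pvD 0 0 0 := rfl
  simp only [h0, pv_loopA]
  simp [pvD, PySem.List.count]
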